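-- pv_equiv track=rewrite | github.com/Lacxs/PH_Typhoon_Bot | notifiers/telegram_alert.py | _get_action_recommendations
-- ===== SOURCE A (Python) =====
-- def _get_action_recommendations(port_status):
--     """Generate action recommendations based on TCWS levels"""
--     # Find highest TCWS level
--     max_tcws = 0
--     affected_ports = []
--
--     for port_name, status in port_status.items():
--         tcws = status.get('tcws')
--         if tcws:
--             if tcws > max_tcws:
--                 max_tcws = tcws
--                 affected_ports = [port_name]
--             elif tcws == max_tcws:
--                 affected_ports.append(port_name)
--
--     if max_tcws == 0:
--         return None
--
--     recommendations = {
--         1: "• Monitor weather updates closely\n• Prepare to secure loose equipment\n• Review emergency procedures\n• Maintain normal operations with caution",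
--         2: "• Secure all containers and equipment\n• Restrict non-essential operations\n• Prepare evacuation plans\n• Stock emergency supplies\n• Brief all personnel on storm procedures",
--         3: "• CEASE OPERATIONS IMMEDIATELY\n• Evacuate non-essential personnel\n• Secure all assets and facilities\n• Activate emergency response team\n• Monitor communications continuously",
--         4: "• FULL EVACUATION - CRITICAL THREAT\n• All personnel to safe locations\n• Complete operational shutdown\n• Activate disaster response protocols\n• Prepare for significant damage assessment",
--         5: "• EXTREME DANGER - CATASTROPHIC CONDITIONS\n• Complete evacuation mandatory\n• Take shelter in reinforced structures\n• Expect widespread severe damage\n• Emergency services may be unavailable"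
--     }
--
--     ports_str = ", ".join(affected_ports)
--     return f"*TCWS #{max_tcws}* at {ports_str}:\n{recommendations.get(max_tcws, '')}"
-- ===== SOURCE B (Python) =====
-- def _get_action_recommendations(port_status):
--     """Generate action recommendations based on TCWS levels"""
--     # One pass for the target level, one filtering pass for the affected ports.
--     positive_levels = [t for status in port_status.values()
--                        if (t := status.get('tcws')) is not None and t > 0]
--     max_tcws = max(positive_levels, default=0)
--     if max_tcws == 0:
--         return None
--
--     affected_ports = [name for name, status in port_status.items()
--                       if status.get('tcws') == max_tcws]
--
--     recommendations = {
--         1: "• Monitor weather updates closely\n• Prepare to secure loose equipment\n• Review emergency procedures\n• Maintain normal operations with caution",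
--         2: "• Secure all containers and equipment\n• Restrict non-essential operations\n• Prepare evacuation plans\n• Stock emergency supplies\n• Brief all personnel on storm procedures",
--         3: "• CEASE OPERATIONS IMMEDIATELY\n• Evacuate non-essential personnel\n• Secure all assets and facilities\n• Activate emergency response team\n• Monitor communications continuously",
--         4: "• FULL EVACUATION - CRITICAL THREAT\n• All personnel to safe locations\n• Complete operational shutdown\n• Activate disaster response protocols\n• Prepare for significant damage assessment",
--         5: "• EXTREME DANGER - CATASTROPHIC CONDITIONS\n• Complete evacuation mandatory\n• Take shelter in reinforced structures\n• Expect widespread severe damage\n• Emergency services may be unavailable"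
--     }
--
--     ports_str = ", ".join(affected_ports)
--     return f"*TCWS #{max_tcws}* at {ports_str}:\n{recommendations.get(max_tcws, '')}"
-- ===== Notes on version B (the rewrite author's own statement) =====
-- stated objective: simpler
-- what changed: Replaces A's single stateful loop with its running-max/reset-or-append bookkeeping by two independent passes: a max over the positive TCWS values (default 0), then a plain filter of the ports whose tcws equals that maximum.
import Mathlib
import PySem

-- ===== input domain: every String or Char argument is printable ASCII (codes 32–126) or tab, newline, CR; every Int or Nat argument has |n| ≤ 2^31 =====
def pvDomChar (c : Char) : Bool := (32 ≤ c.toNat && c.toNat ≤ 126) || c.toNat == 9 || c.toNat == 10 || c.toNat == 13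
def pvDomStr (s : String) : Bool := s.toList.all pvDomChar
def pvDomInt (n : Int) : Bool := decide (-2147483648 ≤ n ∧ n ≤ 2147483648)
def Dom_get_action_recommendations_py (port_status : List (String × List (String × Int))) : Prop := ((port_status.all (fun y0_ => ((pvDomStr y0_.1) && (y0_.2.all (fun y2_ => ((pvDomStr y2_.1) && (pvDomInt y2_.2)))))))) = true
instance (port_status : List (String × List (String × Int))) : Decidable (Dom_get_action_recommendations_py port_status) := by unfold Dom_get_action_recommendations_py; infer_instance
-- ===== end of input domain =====

-- B computes the result in two independent passes (max of positive TCWS values, then a filter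
-- of ports at that level) instead of A's single stateful reset-or-append loop; objective: simpler.


-- shared helpers: the Python dicts (both the argument and the inner status dicts are dicts,
-- rendered as association lists; PySem.Dict.ofList is the dict they denote) and the literal
-- recommendations table, identical in both sources
def tcwsOf (status : List (String × Int)) : Option Int :=
  (PySem.Dict.ofList status).get? "tcws"

def recsDict : PySem.Dict Int String := PySem.Dict.ofList [
  (1, "• Monitor weather updates closely\n• Prepare to secure loose equipment\n• Review emergency procedures\n• Maintain normal operations with caution"),
  (2, "• Secure all containers and equipment\n• Restrict non-essential operations\n• Prepare evacuation plans\n• Stock emergency supplies\n• Brief all personnel on storm procedures"),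
  (3, "• CEASE OPERATIONS IMMEDIATELY\n• Evacuate non-essential personnel\n• Secure all assets and facilities\n• Activate emergency response team\n• Monitor communications continuously"),
  (4, "• FULL EVACUATION - CRITICAL THREAT\n• All personnel to safe locations\n• Complete operational shutdown\n• Activate disaster response protocols\n• Prepare for significant damage assessment"),
  (5, "• EXTREME DANGER - CATASTROPHIC CONDITIONS\n• Complete evacuation mandatory\n• Take shelter in reinforced structures\n• Expect widespread severe damage\n• Emergency services may be unavailable")]

def renderMsg (maxT : Int) (affected : List String) : String :=
  "*TCWS #" ++ PySem.Int.toStr maxT ++ "* at " ++ PySem.Str.join ", " affected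
    ++ ":\n" ++ recsDict.getD maxT ""

-- ===== PORT A =====
-- loop body of A's for-loop: state = (max_tcws, affected_ports)
def stepA (acc : Int × List String) (p : String × List (String × Int)) : Int × List String :=
  match tcwsOf p.2 with
  | none => acc
  | some t =>
    if t = 0 then acc                                 -- `if tcws:` — falsy
    else if acc.1 < t then (t, [p.1])
    else if t = acc.1 then (acc.1, acc.2 ++ [p.1])
    else acc

def get_action_recommendations_py (port_status : List (String × List (String × Int))) : Option String :=
  let res := (PySem.Dict.ofList port_status).items.foldl stepA (0, [])
  if res.1 = 0 then none
  else some (renderMsg res.1 res.2)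

-- ===== PORT B =====
def get_action_recommendations_py_alt (port_status : List (String × List (String × Int))) : Option String :=
  let items := (PySem.Dict.ofList port_status).items
  let positives := items.filterMap (fun p =>
    match tcwsOf p.2 with
    | some t => if 0 < t then some t else none
    | none => none)
  let maxT := PySem.List.maxD positives (fun x => x) 0
  if maxT = 0 then none
  else
    let affected := (items.filter (fun p => tcwsOf p.2 == some maxT)).map (·.1)
    some (renderMsg maxT affected)

-- ===== PRECONDITION & SPEC =====
def Spec_get_action_recommendations_py (port_status : List (String × List (String × Int))) (out : Option String) : Prop := out = get_action_recommendations_py_alt port_status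
instance (port_status : List (String × List (String × Int))) (out : Option String) : Decidable (Spec_get_action_recommendations_py port_status out) := by unfold Spec_get_action_recommendations_py; infer_instance

-- ===== CLAIM (what is proved, stated in full; the proofs are below) =====
def Claim_equal_get_action_recommendations_py : Prop := ∀ (port_status : List (String × List (String × Int))), Dom_get_action_recommendations_py port_status → Spec_get_action_recommendations_py port_status (get_action_recommendations_py port_status)

-- ===== LEMMAS AND PROOFS =====

-- the positive tcws values of a list of items (B's `positives` pass, as a named function)
def posVals (l : List (String × List (String × Int))) : List Int :=
  l.filterMap (fun p =>
    match tcwsOf p.2 with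
    | some t => if 0 < t then some t else none
    | none => none)

-- characterisation of A's loop: final max is the running max of the positive tcws values,
-- final affected list is (previous list, if the max never rose) ++ the ports at the final max
lemma foldA_char (l : List (String × List (String × Int))) (m : Int) (aff : List String)
    (hm : 0 ≤ m) :
    l.foldl stepA (m, aff) =
      ((posVals l).foldl max m,
       (if (posVals l).foldl max m = m then aff else []) ++
         ((l.filter (fun p => tcwsOf p.2 == some ((posVals l).foldl max m)
             && decide (0 < (posVals l).foldl max m))).map (·.1))) := by
  induction l generalizing m aff with
  | nil => simp [posVals]
  | cons p rest ih =>
    cases h : tcwsOf p.2 with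
    | none =>
      have h1 : posVals (p :: rest) = posVals rest := by simp [posVals, h]
      have h2 : stepA (m, aff) p = (m, aff) := by simp [stepA, h]
      rw [List.foldl_cons, h2, ih m aff hm, h1]
      congr 1
      rw [List.filter_cons]
      simp [h]
    | some t =>
      rcases lt_trichotomy t 0 with htn | ht0 | htp
      · -- negative tcws: truthy but neither > max (max ≥ 0) nor == max
        have h1 : posVals (p :: rest) = posVals rest := by
          simp [posVals, h, show ¬ (0:Int) < t by omega]
        have h2 : stepA (m, aff) p = (m, aff) := by
          simp only [stepA, h]
          rw [if_neg (by omega), if_neg (by omega), if_neg (by omega)]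
        rw [List.foldl_cons, h2, ih m aff hm, h1]
        have hM0 : 0 ≤ (posVals rest).foldl max m :=
          le_trans hm (PySem.List.le_foldl_max _ _).1
        congr 1
        rw [List.filter_cons]
        have : (tcwsOf p.2 == some ((posVals rest).foldl max m)
            && decide (0 < (posVals rest).foldl max m)) = false := by
          simp [h]; omega
        simp [this]
      · -- tcws == 0 is falsy: skipped
        subst ht0
        have h1 : posVals (p :: rest) = posVals rest := by simp [posVals, h]
        have h2 : stepA (m, aff) p = (m, aff) := by simp [stepA, h]
        rw [List.foldl_cons, h2, ih m aff hm, h1]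
        congr 1
        rw [List.filter_cons]
        have : (tcwsOf p.2 == some ((posVals rest).foldl max m)
            && decide (0 < (posVals rest).foldl max m)) = false := by
          simp [h]; omega
        simp [this]
      · -- positive tcws
        have h1 : posVals (p :: rest) = t :: posVals rest := by simp [posVals, h, htp]
        rw [h1, List.foldl_cons, List.foldl_cons]
        rcases lt_trichotomy m t with hmt | hmt | hmt
        · -- new maximum: reset the list
          have h2 : stepA (m, aff) p = (t, [p.1]) := by
            simp only [stepA, h]
            rw [if_neg (by omega), if_pos hmt]
          rw [h2, ih t [p.1] (by omega), max_eq_right hmt.le]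
          set M := (posVals rest).foldl max t with hMdef
          have hMt : t ≤ M := (PySem.List.le_foldl_max _ _).1
          have hpos : 0 < M := by omega
          rw [if_neg (show M ≠ m by omega), List.filter_cons]
          by_cases hEq : t = M
          · simp [h, hEq, hpos]
          · simp [h, hEq, hpos, show ¬ M = t from fun hh => hEq hh.symm]
        · -- tcws equal to the current maximum: append
          have h2 : stepA (m, aff) p = (m, aff ++ [p.1]) := by
            simp only [stepA, h]
            rw [if_neg (by omega), if_neg (by omega), if_pos hmt.symm]
          rw [h2, ih m (aff ++ [p.1]) hm, show max m t = m by omega]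
          set M := (posVals rest).foldl max m with hMdef
          have hMt : m ≤ M := (PySem.List.le_foldl_max _ _).1
          have hpos : 0 < M := by omega
          rw [List.filter_cons]
          by_cases hMm : M = m
          · simp [h, hMm, show t = M by omega, show (0:Int) < m by omega, List.append_assoc]
          · simp [h, hMm, hpos, show ¬ t = M by omega]
        · -- positive but below the current maximum: skipped
          have h2 : stepA (m, aff) p = (m, aff) := by
            simp only [stepA, h]
            rw [if_neg (by omega), if_neg (by omega), if_neg (by omega)]
          rw [h2, ih m aff hm, max_eq_left hmt.le]
          set M := (posVals rest).foldl max m with hMdef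
          have hMm : m ≤ M := (PySem.List.le_foldl_max _ _).1
          congr 1
          rw [List.filter_cons]
          have : (tcwsOf p.2 == some M && decide (0 < M)) = false := by
            simp [h]; omega
          simp [this]

-- B's max(…, default=0) equals the running-max fold when all values are positive
lemma maxD_pos (vals : List Int) (h : ∀ v ∈ vals, 0 < v) :
    PySem.List.maxD vals (fun x => x) 0 = vals.foldl max 0 := by
  cases vals with
  | nil => simp [PySem.List.maxD, PySem.List.max?]
  | cons x t =>
    have hx : 0 < x := h x (by simp)
    rw [PySem.List.maxD, PySem.List.max?_id_cons]
    simp only [Option.getD_some, List.foldl_cons]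
    rw [max_eq_right hx.le]

lemma posVals_pos (l : List (String × List (String × Int))) :
    ∀ v ∈ posVals l, 0 < v := by
  intro v hv
  simp only [posVals, List.mem_filterMap] at hv
  obtain ⟨p, _, hp⟩ := hv
  cases h : tcwsOf p.2 <;> rw [h] at hp
  · simp at hp
  · rename_i t
    by_cases ht : (0:Int) < t
    · simp [ht] at hp; omega
    · simp [ht] at hp

-- ===== VERDICT (by name: the statement is the Claim_ definition above) =====
theorem get_action_recommendations_py_spec : Claim_equal_get_action_recommendations_py := by
  intro port_status _
  unfold Spec_get_action_recommendations_py
  simp only [get_action_recommendations_py, get_action_recommendations_py_alt]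
  set l := (PySem.Dict.ofList port_status).items with hl
  rw [foldA_char l 0 [] le_rfl]
  have hpv : l.filterMap (fun p =>
        match tcwsOf p.2 with
        | some t => if 0 < t then some t else none
        | none => none) = posVals l := rfl
  rw [hpv, maxD_pos (posVals l) (posVals_pos l)]
  set M := (posVals l).foldl max 0 with hM
  by_cases h0 : M = 0
  · simp [h0]
  · have hMpos : 0 < M := lt_of_le_of_ne (PySem.List.le_foldl_max (posVals l) 0).1 (Ne.symm h0)
    simp [h0, hMpos]
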